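-- pv_equiv track=rewrite | github.com/nikvaleg/MtkTsk | var1/pcap_processing.py | find_matching_intervals
-- ===== SOURCE A (Python) =====
-- def find_matching_intervals(seq1, seq2, min_match_length):
--     m, n = len(seq1), len(seq2)
--     table = [[0] * n for _ in range(m)]
--     intervals = []
--
--     # Поиск всех максимальных подпоследовательностей
--     for i in range(m):
--         for j in range(n):
--             if seq1[i][0] == seq2[j][0]:
--                 if i == 0 or j == 0:
--                     table[i][j] = 1
--                 else:
--                     table[i][j] = table[i - 1][j - 1] + 1
--
--                 if table[i][j] >= min_match_length:
--                     start_i = i - table[i][j] + 1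
--                     start_j = j - table[i][j] + 1
--                     length = table[i][j]
--                     intervals.append((start_i, start_j, length, seq1[start_i][1], seq2[start_j][1]))
--             else:
--                 table[i][j] = 0
--
--     # Сортировка интервалов по длине в убывающем порядке
--     intervals.sort(key=lambda x: x[2], reverse=True)
--
--     # Фильтрация интервалов, убираем те, которые полностью входят в другие
--     filtered_intervals = []
--
--     for interval in intervals:
--         start_i, start_j, length, _, _ = interval
--         is_subset = False
--
--         # Проверяем, не является ли текущий интервал полностью вложенным в уже найденные интервалы
--         for existing in filtered_intervals:
--             existing_start_i, existing_start_j, existing_length, _, _ = existing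
--             if (start_i >= existing_start_i and start_i + length <= existing_start_i + existing_length and
--                     start_j >= existing_start_j and start_j + length <= existing_start_j + existing_length):
--                 is_subset = True
--                 break
--
--         if not is_subset:
--             filtered_intervals.append(interval)
--
--     return filtered_intervals
-- ===== SOURCE B (Python) =====
-- def find_matching_intervals(seq1, seq2, min_match_length):
--     m, n = len(seq1), len(seq2)
--     runs = []
--     # scan each diagonal once, recording only the MAXIMAL runs (at run end);
--     # non-maximal prefixes are always eliminated by A's subset filter anyway
--     for d in range(-(m - 1) if m > 0 else 0, n):
--         i = -d if d < 0 else 0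
--         j = i + d
--         run = 0
--         while i < m and j < n:
--             if seq1[i][0] == seq2[j][0]:
--                 run += 1
--                 at_end = (i + 1 >= m or j + 1 >= n or seq1[i + 1][0] != seq2[j + 1][0])
--                 if at_end and run >= min_match_length:
--                     si, sj = i - run + 1, j - run + 1
--                     runs.append((si, sj, run, seq1[si][1], seq2[sj][1]))
--             else:
--                 run = 0
--             i += 1
--             j += 1
--     # total strict key reproducing A's stable length-descending order
--     runs.sort(key=lambda r: (-r[2], r[0], r[1]))
--     out = []
--     for r in runs:
--         si, sj, ln = r[0], r[1], r[2]
--         if not any(si >= ei and si + ln <= ei + el and sj >= ej and sj + ln <= ej + el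
--                    for ei, ej, el, _, _ in out):
--             out.append(r)
--     return out
-- ===== Notes on version B (the rewrite author's own statement) =====
-- stated objective: alternative
-- what changed: B replaces A's O(m*n) DP table and per-prefix candidate list by a single O(1)-memory scan of each diagonal that records only MAXIMAL runs (prefix candidates are provably always deleted by the subset filter), and sorts them by the total key (-length, start_i, start_j), which reproduces A's stable length-descending order exactly.
import Mathlib
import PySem

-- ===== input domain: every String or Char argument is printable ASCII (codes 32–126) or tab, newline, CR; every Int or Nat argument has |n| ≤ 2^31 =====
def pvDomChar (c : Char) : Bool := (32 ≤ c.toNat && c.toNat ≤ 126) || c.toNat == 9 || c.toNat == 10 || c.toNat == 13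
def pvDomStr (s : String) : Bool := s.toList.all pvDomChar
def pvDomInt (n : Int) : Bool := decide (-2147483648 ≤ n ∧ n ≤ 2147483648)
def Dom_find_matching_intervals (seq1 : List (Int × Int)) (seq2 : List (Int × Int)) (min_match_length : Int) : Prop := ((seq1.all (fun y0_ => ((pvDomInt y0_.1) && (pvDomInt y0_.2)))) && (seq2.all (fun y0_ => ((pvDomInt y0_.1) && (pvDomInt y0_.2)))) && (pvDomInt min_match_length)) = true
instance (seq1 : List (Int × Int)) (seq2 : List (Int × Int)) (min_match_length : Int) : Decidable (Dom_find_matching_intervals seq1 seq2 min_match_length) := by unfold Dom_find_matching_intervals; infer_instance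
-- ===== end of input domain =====

-- B replaces A's DP table + per-prefix candidate list by a one-pass-per-diagonal scan emitting only
-- maximal runs, sorted by the total key (-length, start_i, start_j); same return value, proved below.

-- ===== PORT A =====
-- subset test of A's filter phase ('existing' contains 'interval'), shared shape with B's any()
def pvSub (x e : Int × Int × Int × Int × Int) : Bool :=
  decide (e.1 ≤ x.1 ∧ x.1 + x.2.2.1 ≤ e.1 + e.2.2.1 ∧ e.2.1 ≤ x.2.1 ∧ x.2.1 + x.2.2.1 ≤ e.2.1 + e.2.2.1)

-- the body of A's inner 'for j in range(n)' loop (st = (table, intervals))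
def pvInnerA (seq1 seq2 : List (Int × Int)) (min_match_length i : Int)
    (st : List (List Int) × List (Int × Int × Int × Int × Int)) (j : Int) :
    List (List Int) × List (Int × Int × Int × Int × Int) :=
  let table := st.1
  let intervals := st.2
  if (PySem.List.pyGetD seq1 i (0, 0)).1 = (PySem.List.pyGetD seq2 j (0, 0)).1 then
    let v : Int := if i = 0 ∨ j = 0 then 1 else
      PySem.List.pyGetD (PySem.List.pyGetD table (i - 1) []) (j - 1) 0 + 1
    let table := PySem.List.pySetD table i (PySem.List.pySetD (PySem.List.pyGetD table i []) j v)
    if min_match_length ≤ v then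
      let start_i := i - v + 1
      let start_j := j - v + 1
      (table, intervals ++ [(start_i, start_j, v,
        (PySem.List.pyGetD seq1 start_i (0, 0)).2, (PySem.List.pyGetD seq2 start_j (0, 0)).2)])
    else (table, intervals)
  else
    (PySem.List.pySetD table i (PySem.List.pySetD (PySem.List.pyGetD table i []) j 0), intervals)

def find_matching_intervals (seq1 : List (Int × Int)) (seq2 : List (Int × Int)) (min_match_length : Int) : List (Int × Int × Int × Int × Int) :=
  let m := PySem.List.len seq1
  let n := PySem.List.len seq2
  -- [[0] * n for _ in range(m)] ; [0]*n is List.replicate (exact: n = len(seq2) ≥ 0)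
  let table : List (List Int) := (PySem.List.pyRange 0 m 1).map (fun _ => List.replicate n.toNat (0 : Int))
  let st :=
    (PySem.List.pyRange 0 m 1).foldl (fun st i =>
      (PySem.List.pyRange 0 n 1).foldl (pvInnerA seq1 seq2 min_match_length i) st)
      (table, [])
  let intervals := PySem.List.sorted st.2 (fun x => x.2.2.1) true
  intervals.foldl (fun filtered interval =>
    let is_subset := filtered.any (fun existing => pvSub interval existing)
    if is_subset then filtered else filtered ++ [interval]) []

-- ===== PORT B =====
-- strict total key (-length, start_i, start_j) of Source B's runs.sort
def pvLex3 (a b : Int × Int × Int × Int × Int) : Bool :=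
  decide (b.2.2.1 < a.2.2.1 ∨ (a.2.2.1 = b.2.2.1 ∧ (a.1 < b.1 ∨ (a.1 = b.1 ∧ a.2.1 < b.2.1))))

-- insertion step of the sort of Source B (list.sort with a strict total key)
def pvIns (x : Int × Int × Int × Int × Int) : List (Int × Int × Int × Int × Int) → List (Int × Int × Int × Int × Int)
  | [] => [x]
  | y :: t => if pvLex3 x y then x :: y :: t else y :: pvIns x t

def pvSort (l : List (Int × Int × Int × Int × Int)) : List (Int × Int × Int × Int × Int) :=
  l.foldl (fun acc x => pvIns x acc) []

-- the inner 'while i < m and j < n' walk along one diagonal; fuel bounds the iterations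
def pvWalk (seq1 seq2 : List (Int × Int)) (min_match_length m n : Int) :
    Nat → Int → Int → Int → List (Int × Int × Int × Int × Int) → List (Int × Int × Int × Int × Int)
  | 0, _, _, _, runs => runs
  | fuel + 1, i, j, run, runs =>
    if i < m ∧ j < n then
      if (PySem.List.pyGetD seq1 i (0, 0)).1 = (PySem.List.pyGetD seq2 j (0, 0)).1 then
        let run := run + 1
        let at_end : Bool := decide (m ≤ i + 1) || decide (n ≤ j + 1) ||
          decide ((PySem.List.pyGetD seq1 (i + 1) (0, 0)).1 ≠ (PySem.List.pyGetD seq2 (j + 1) (0, 0)).1)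
        let runs := if at_end ∧ min_match_length ≤ run then
            runs ++ [(i - run + 1, j - run + 1, run,
              (PySem.List.pyGetD seq1 (i - run + 1) (0, 0)).2,
              (PySem.List.pyGetD seq2 (j - run + 1) (0, 0)).2)]
          else runs
        pvWalk seq1 seq2 min_match_length m n fuel (i + 1) (j + 1) run runs
      else
        pvWalk seq1 seq2 min_match_length m n fuel (i + 1) (j + 1) 0 runs
    else runs

def find_matching_intervals_alt (seq1 : List (Int × Int)) (seq2 : List (Int × Int)) (min_match_length : Int) : List (Int × Int × Int × Int × Int) :=
  let m := PySem.List.len seq1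
  let n := PySem.List.len seq2
  let runs :=
    (PySem.List.pyRange (if 0 < m then -(m - 1) else 0) n 1).foldl (fun runs d =>
      let i : Int := if d < 0 then -d else 0
      let j := i + d
      pvWalk seq1 seq2 min_match_length m n (m.toNat + n.toNat) i j 0 runs) []
  let runs := pvSort runs
  runs.foldl (fun out r =>
    if out.any (fun e => decide (e.1 ≤ r.1 ∧ r.1 + r.2.2.1 ≤ e.1 + e.2.2.1 ∧
        e.2.1 ≤ r.2.1 ∧ r.2.1 + r.2.2.1 ≤ e.2.1 + e.2.2.1)) then out else out ++ [r]) []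

-- ===== PRECONDITION & SPEC =====
def Spec_find_matching_intervals (seq1 : List (Int × Int)) (seq2 : List (Int × Int)) (min_match_length : Int) (out : List (Int × Int × Int × Int × Int)) : Prop := out = find_matching_intervals_alt seq1 seq2 min_match_length
instance (seq1 : List (Int × Int)) (seq2 : List (Int × Int)) (min_match_length : Int) (out : List (Int × Int × Int × Int × Int)) : Decidable (Spec_find_matching_intervals seq1 seq2 min_match_length out) := by unfold Spec_find_matching_intervals; infer_instance

-- ===== CLAIM (what is proved, stated in full; the proofs are below) =====
def Claim_equal_find_matching_intervals : Prop := ∀ (seq1 : List (Int × Int)) (seq2 : List (Int × Int)) (min_match_length : Int), Dom_find_matching_intervals seq1 seq2 min_match_length → Spec_find_matching_intervals seq1 seq2 min_match_length (find_matching_intervals seq1 seq2 min_match_length)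

-- ===== LEMMAS AND PROOFS =====

-- ---- spec-side vocabulary (Nat-indexed view of the two sequences) ----

-- tag at position i of a sequence (0 beyond the end; only used in range)
def pvF1 (s : List (Int × Int)) (i : Nat) : Int := (s.getD i (0, 0)).1
def pvF2 (s : List (Int × Int)) (i : Nat) : Int := (s.getD i (0, 0)).2

-- length of the common run ending at cell (i, j)  (A's table[i][j])
def pvRL (s1 s2 : List (Int × Int)) : Nat → Nat → Nat
  | 0, j => if pvF1 s1 0 = pvF1 s2 j then 1 else 0
  | i + 1, 0 => if pvF1 s1 (i + 1) = pvF1 s2 0 then 1 else 0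
  | i + 1, j + 1 => if pvF1 s1 (i + 1) = pvF1 s2 (j + 1) then pvRL s1 s2 i j + 1 else 0

-- the interval A appends at cell (i, j) when table value is t
def pvMkIv (s1 s2 : List (Int × Int)) (i j t : Nat) : Int × Int × Int × Int × Int :=
  ((i : Int) - t + 1, (j : Int) - t + 1, (t : Int), pvF2 s1 (i + 1 - t), pvF2 s2 (j + 1 - t))

-- candidate produced at cell (i, j), if any
def pvCnd (s1 s2 : List (Int × Int)) (mml : Int) (i j : Nat) : Option (Int × Int × Int × Int × Int) :=
  if pvF1 s1 i = pvF1 s2 j ∧ mml ≤ (pvRL s1 s2 i j : Int) then some (pvMkIv s1 s2 i j (pvRL s1 s2 i j)) else none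

-- maximality of an interval: its run cannot be extended one more step
def pvPm (s1 s2 : List (Int × Int)) (x : Int × Int × Int × Int × Int) : Bool :=
  !(decide (x.1 + x.2.2.1 < (s1.length : Int) ∧ x.2.1 + x.2.2.1 < (s2.length : Int) ∧
      pvF1 s1 (x.1 + x.2.2.1).toNat = pvF1 s2 (x.2.1 + x.2.2.1).toNat))

def pvCndM (s1 s2 : List (Int × Int)) (mml : Int) (c : Nat × Nat) : Option (Int × Int × Int × Int × Int) :=
  (pvCnd s1 s2 mml c.1 c.2).filter (pvPm s1 s2)

-- row-major cell list and A's candidate list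
def pvCellsRM (m n : Nat) : List (Nat × Nat) :=
  (List.range m).flatMap (fun i => (List.range n).map (fun j => (i, j)))

def pvCandA (s1 s2 : List (Int × Int)) (mml : Int) : List (Int × Int × Int × Int × Int) :=
  (pvCellsRM s1.length s2.length).filterMap (fun c => pvCnd s1 s2 mml c.1 c.2)

-- diagonal cell list (cells of diagonal j - i = d, top to bottom) and B's run list
def pvDiag (m n : Nat) (d : Int) : List (Nat × Nat) :=
  (List.range (min (m - (-d).toNat) (n - d.toNat))).map (fun k => ((-d).toNat + k, d.toNat + k))

def pvCellsDg (m n : Nat) : List (Nat × Nat) :=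
  (PySem.List.pyRange (if 0 < (m : Int) then -((m : Int) - 1) else 0) (n : Int) 1).flatMap (pvDiag m n)

def pvCandB (s1 s2 : List (Int × Int)) (mml : Int) : List (Int × Int × Int × Int × Int) :=
  (pvCellsDg s1.length s2.length).filterMap (pvCndM s1 s2 mml)

-- strict order / containment facts
def pvR (a b : Int × Int × Int × Int × Int) : Prop := pvLex3 a b = true

theorem pvR_iff (a b : Int × Int × Int × Int × Int) :
    pvR a b ↔ (b.2.2.1 < a.2.2.1 ∨ (a.2.2.1 = b.2.2.1 ∧ (a.1 < b.1 ∨ (a.1 = b.1 ∧ a.2.1 < b.2.1)))) := by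
  simp [pvR, pvLex3]

theorem pvR_asymm {a b : Int × Int × Int × Int × Int} (h1 : pvR a b) (h2 : pvR b a) : False := by
  rw [pvR_iff] at h1 h2; omega

theorem pvR_trans {a b c : Int × Int × Int × Int × Int} (h1 : pvR a b) (h2 : pvR b c) : pvR a c := by
  rw [pvR_iff] at *; omega

theorem pvSub_refl (x : Int × Int × Int × Int × Int) : pvSub x x = true := by simp [pvSub]

theorem pvSub_trans {x y z : Int × Int × Int × Int × Int} (h1 : pvSub x y = true) (h2 : pvSub y z = true) :
    pvSub x z = true := by simp [pvSub] at *; omega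

-- the shared subset-filter loop
def pvFF (acc l : List (Int × Int × Int × Int × Int)) : List (Int × Int × Int × Int × Int) :=
  l.foldl (fun acc x => if acc.any (fun e => pvSub x e) then acc else acc ++ [x]) acc

-- ---- basic runlen facts ----

theorem pvRL_pos_iff (s1 s2 : List (Int × Int)) (i j : Nat) :
    0 < pvRL s1 s2 i j ↔ pvF1 s1 i = pvF1 s2 j := by
  match i, j with
  | 0, j => simp [pvRL]; split <;> simp_all
  | i + 1, 0 => simp [pvRL]; split <;> simp_all
  | i + 1, j + 1 => simp [pvRL]; split <;> simp_all

theorem pvRL_le (s1 s2 : List (Int × Int)) (i j : Nat) :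
    pvRL s1 s2 i j ≤ i + 1 ∧ pvRL s1 s2 i j ≤ j + 1 := by
  induction i generalizing j with
  | zero => match j with
    | 0 => unfold pvRL; split <;> omega
    | j + 1 => unfold pvRL; split <;> omega
  | succ i ih => match j with
    | 0 => unfold pvRL; split <;> omega
    | j + 1 => have := ih j; unfold pvRL; split <;> omega

theorem pvRL_succ (s1 s2 : List (Int × Int)) (i j : Nat) (h : pvF1 s1 (i + 1) = pvF1 s2 (j + 1)) :
    pvRL s1 s2 (i + 1) (j + 1) = pvRL s1 s2 i j + 1 := by
  conv_lhs => rw [pvRL]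
  simp [h]

-- ---- the table of A: row i after c columns processed ----

def pvRowR (s1 s2 : List (Int × Int)) (i : Nat) : List Int :=
  (List.range s2.length).map (fun j => (pvRL s1 s2 i j : Int))

def pvPart (row : List Int) (n c : Nat) : List Int := row.take c ++ List.replicate (n - c) 0

def pvTb (s1 s2 : List (Int × Int)) (i j : Nat) : List (List Int) :=
  (List.range s1.length).map (fun r =>
    pvPart (pvRowR s1 s2 r) s2.length (if r < i then s2.length else if r = i then j else 0))

theorem pvPart_full (row : List Int) (n : Nat) (h : row.length = n) : pvPart row n n = row := by
  simp [pvPart, ← h]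

theorem pvPart_set (row : List Int) (n c : Nat) (h : row.length = n) (hc : c < n) (v : Int)
    (hv : v = row.getD c 0) : (pvPart row n c).set c v = pvPart row n (c + 1) := by
  apply List.ext_getElem
  · simp [pvPart, h]; omega
  · intro k hk1 hk2
    simp only [pvPart] at *
    rw [List.getElem_set]
    by_cases hki : c = k
    · subst hki
      rw [if_pos rfl, List.getElem_append_left (by simp; omega), List.getElem_take]
      rw [hv, List.getD_eq_getElem?_getD, List.getElem?_eq_getElem (by omega)]
      simp
    · rw [if_neg hki]
      by_cases hlt : k < c
      · rw [List.getElem_append_left (by simp; omega), List.getElem_append_left (by simp; omega)]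
        simp [List.getElem_take]
      · rw [List.getElem_append_right (by simp; omega), List.getElem_append_right (by simp; omega)]
        simp

theorem pvMapRange_set {α : Type} (m i : Nat) (g : Nat → α) (x : α) :
    ((List.range m).map g).set i x = (List.range m).map (fun r => if r = i then x else g r) := by
  apply List.ext_getElem
  · simp
  · intro k hk1 hk2
    rw [List.getElem_set]
    simp only [List.getElem_map, List.getElem_range]
    by_cases h : i = k
    · subst h; simp
    · rw [if_neg h, if_neg (by omega)]

theorem pvRowR_getD (s1 s2 : List (Int × Int)) (i j : Nat) (hj : j < s2.length) :
    (pvRowR s1 s2 i).getD j 0 = (pvRL s1 s2 i j : Int) := by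
  rw [pvRowR, List.getD_eq_getElem?_getD, List.getElem?_eq_getElem (by simpa using hj)]
  simp

theorem pvTb_getD (s1 s2 : List (Int × Int)) (i j r : Nat) (hr : r < s1.length) :
    (pvTb s1 s2 i j).getD r [] =
      pvPart (pvRowR s1 s2 r) s2.length (if r < i then s2.length else if r = i then j else 0) := by
  rw [pvTb, List.getD_eq_getElem?_getD, List.getElem?_eq_getElem (by simpa using hr)]
  simp

theorem pvRange_cast (m : Nat) :
    PySem.List.pyRange 0 (m : Int) 1 = (List.range m).map (fun k : Nat => (k : Int)) := by
  apply List.ext_getElem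
  · simp [PySem.List.length_pyRange_one]
  · intro k h1 h2
    rw [PySem.List.getElem_pyRange_one]
    simp

theorem pvStepA_eval (s1 s2 : List (Int × Int)) (mml : Int) (iN jN : Nat)
    (hi : iN < s1.length) (hj : jN < s2.length) (acc : List (Int × Int × Int × Int × Int)) :
    pvInnerA s1 s2 mml (iN : Int) (pvTb s1 s2 iN jN, acc) (jN : Int) =
      (pvTb s1 s2 iN (jN + 1), acc ++ (pvCnd s1 s2 mml iN jN).toList) := by
  have hrow : (pvRowR s1 s2 iN).length = s2.length := by simp [pvRowR]
  have htbi : (pvTb s1 s2 iN jN).getD (iN : Nat) [] = pvPart (pvRowR s1 s2 iN) s2.length jN := by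
    rw [pvTb_getD s1 s2 iN jN iN hi]; simp
  have hsetrow : ∀ v : Int, v = (pvRowR s1 s2 iN).getD jN 0 →
      ((pvTb s1 s2 iN jN).set iN ((pvPart (pvRowR s1 s2 iN) s2.length jN).set jN v)) = pvTb s1 s2 iN (jN + 1) := by
    intro v hv
    rw [pvPart_set _ _ _ hrow hj v hv]
    unfold pvTb
    rw [pvMapRange_set]
    apply List.map_congr_left
    intro r _
    by_cases h1 : r = iN
    · subst h1; simp
    · rw [if_neg h1]
      have : (if r < iN then s2.length else if r = iN then jN else 0)
          = (if r < iN then s2.length else if r = iN then jN + 1 else 0) := by split_ifs <;> omega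
      rw [this]
  simp only [pvInnerA, PySem.List.pyGetD_natCast, PySem.List.pySetD_natCast, htbi]
  by_cases hm : (s1.getD iN (0, 0)).1 = (s2.getD jN (0, 0)).1
  · rw [if_pos hm]
    have hmf : pvF1 s1 iN = pvF1 s2 jN := hm
    have hrl1 : 0 < pvRL s1 s2 iN jN := (pvRL_pos_iff s1 s2 iN jN).2 hmf
    have hle := pvRL_le s1 s2 iN jN
    have hv : (if (iN : Int) = 0 ∨ (jN : Int) = 0 then (1 : Int) else
        PySem.List.pyGetD (PySem.List.pyGetD (pvTb s1 s2 iN jN) ((iN : Int) - 1) [])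
          ((jN : Int) - 1) 0 + 1) = ((pvRL s1 s2 iN jN : Nat) : Int) := by
      match iN, jN with
      | 0, jN => simp [pvRL, hmf]
      | iN + 1, 0 => simp [pvRL, hmf]
      | iN + 1, jN + 1 =>
        rw [if_neg (by push_cast; omega)]
        have e1 : ((iN + 1 : Nat) : Int) - 1 = ((iN : Nat) : Int) := by push_cast; omega
        have e2 : ((jN + 1 : Nat) : Int) - 1 = ((jN : Nat) : Int) := by push_cast; omega
        rw [e1, e2, PySem.List.pyGetD_natCast, PySem.List.pyGetD_natCast,
          pvTb_getD s1 s2 (iN + 1) (jN + 1) iN (by omega), if_pos (by omega),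
          pvPart_full _ _ (by simp [pvRowR]), pvRowR_getD s1 s2 iN jN (by omega),
          pvRL_succ s1 s2 iN jN hmf]
        push_cast; ring
    rw [hv]
    have hveq : ((pvRL s1 s2 iN jN : Nat) : Int) = (pvRowR s1 s2 iN).getD jN 0 :=
      (pvRowR_getD s1 s2 iN jN hj).symm
    rw [hsetrow _ hveq]
    have hcnd : pvCnd s1 s2 mml iN jN =
        if mml ≤ ((pvRL s1 s2 iN jN : Nat) : Int) then some (pvMkIv s1 s2 iN jN (pvRL s1 s2 iN jN)) else none := by
      simp [pvCnd, hmf]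
    by_cases hq : mml ≤ ((pvRL s1 s2 iN jN : Nat) : Int)
    · rw [if_pos hq]
      have e3 : (iN : Int) - ((pvRL s1 s2 iN jN : Nat) : Int) + 1 = ((iN + 1 - pvRL s1 s2 iN jN : Nat) : Int) := by
        omega
      have e4 : (jN : Int) - ((pvRL s1 s2 iN jN : Nat) : Int) + 1 = ((jN + 1 - pvRL s1 s2 iN jN : Nat) : Int) := by
        omega
      rw [hcnd, if_pos hq]
      simp only [e3, e4, PySem.List.pyGetD_natCast, Option.toList_some]
      simp only [pvMkIv, pvF2]
      rw [← e3, ← e4]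
    · rw [if_neg hq, hcnd, if_neg hq]
      simp
  · rw [if_neg hm]
    have hrl0 : pvRL s1 s2 iN jN = 0 := by
      have := pvRL_pos_iff s1 s2 iN jN
      by_contra hne
      exact hm (this.1 (by omega))
    have hveq : (0 : Int) = (pvRowR s1 s2 iN).getD jN 0 := by
      rw [pvRowR_getD s1 s2 iN jN hj, hrl0]; rfl
    rw [hsetrow _ hveq]
    have hcnd : pvCnd s1 s2 mml iN jN = none := by
      unfold pvCnd
      rw [if_neg (by intro hc; exact hm hc.1)]
    rw [hcnd]
    simp

theorem pvInnerA_eval (s1 s2 : List (Int × Int)) (mml : Int) (iN : Nat) (hi : iN < s1.length)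
    (acc : List (Int × Int × Int × Int × Int)) :
    (PySem.List.pyRange 0 (s2.length : Int) 1).foldl (pvInnerA s1 s2 mml (iN : Int)) (pvTb s1 s2 iN 0, acc) =
      (pvTb s1 s2 iN s2.length, acc ++ (List.range s2.length).filterMap (fun j => pvCnd s1 s2 mml iN j)) := by
  rw [pvRange_cast s2.length, List.foldl_map]
  have aux : ∀ jC, jC ≤ s2.length →
      (List.range jC).foldl (fun st (k : Nat) => pvInnerA s1 s2 mml (iN : Int) st (k : Int)) (pvTb s1 s2 iN 0, acc) =
        (pvTb s1 s2 iN jC, acc ++ (List.range jC).filterMap (fun j => pvCnd s1 s2 mml iN j)) := by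
    intro jC hjC
    induction jC with
    | zero => simp
    | succ j ih =>
      rw [List.range_succ, List.foldl_append, List.filterMap_append, ih (by omega)]
      simp only [List.foldl_cons, List.foldl_nil]
      rw [pvStepA_eval s1 s2 mml iN j hi (by omega)]
      rcases h : pvCnd s1 s2 mml iN j <;> simp [h]
  exact aux s2.length le_rfl

theorem pvTb_step (s1 s2 : List (Int × Int)) (i : Nat) :
    pvTb s1 s2 i s2.length = pvTb s1 s2 (i + 1) 0 := by
  unfold pvTb
  apply List.map_congr_left
  intro r _
  have hc : (if r < i then s2.length else if r = i then s2.length else 0)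
      = (if r < i + 1 then s2.length else if r = i + 1 then 0 else 0) := by
    split_ifs <;> omega
  rw [hc]

theorem pvOuterA (s1 s2 : List (Int × Int)) (mml : Int) :
    (PySem.List.pyRange 0 (s1.length : Int) 1).foldl
      (fun st i => (PySem.List.pyRange 0 (s2.length : Int) 1).foldl (pvInnerA s1 s2 mml i) st)
      (pvTb s1 s2 0 0, []) =
    (pvTb s1 s2 s1.length 0,
      (List.range s1.length).flatMap (fun i => (List.range s2.length).filterMap (fun j => pvCnd s1 s2 mml i j))) := by
  rw [pvRange_cast s1.length, List.foldl_map]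
  have aux : ∀ iC, iC ≤ s1.length →
      (List.range iC).foldl
        (fun st (k : Nat) => (PySem.List.pyRange 0 (s2.length : Int) 1).foldl (pvInnerA s1 s2 mml (k : Int)) st)
        (pvTb s1 s2 0 0, []) =
      (pvTb s1 s2 iC 0,
        (List.range iC).flatMap (fun i => (List.range s2.length).filterMap (fun j => pvCnd s1 s2 mml i j))) := by
    intro iC hiC
    induction iC with
    | zero => simp
    | succ i ih =>
      rw [List.range_succ, List.foldl_append, List.flatMap_append, ih (by omega)]
      simp only [List.foldl_cons, List.foldl_nil]
      rw [pvInnerA_eval s1 s2 mml i (by omega), pvTb_step]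
      simp
  exact aux s1.length le_rfl

theorem pvCandA_flat (s1 s2 : List (Int × Int)) (mml : Int) :
    pvCandA s1 s2 mml =
      (List.range s1.length).flatMap (fun i => (List.range s2.length).filterMap (fun j => pvCnd s1 s2 mml i j)) := by
  rw [pvCandA, pvCellsRM, List.filterMap_flatMap]
  simp [List.filterMap_map, Function.comp]

theorem pvA_eq (s1 s2 : List (Int × Int)) (mml : Int) :
    find_matching_intervals s1 s2 mml =
      pvFF [] (PySem.List.sorted (pvCandA s1 s2 mml) (fun x => x.2.2.1) true) := by
  unfold find_matching_intervals
  simp only [PySem.List.len_eq]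
  have hinit : ((PySem.List.pyRange 0 (s1.length : Int) 1).map
      (fun _ => List.replicate ((s2.length : Int)).toNat (0 : Int))) = pvTb s1 s2 0 0 := by
    rw [pvTb]
    simp only [Int.toNat_natCast, List.map_const', PySem.List.length_pyRange_one]
    simp [pvPart, List.map_const']
  rw [hinit, pvOuterA, ← pvCandA_flat]
  rfl

theorem pvPm_mkIv (s1 s2 : List (Int × Int)) (i j : Nat) :
    pvPm s1 s2 (pvMkIv s1 s2 i j (pvRL s1 s2 i j)) =
      !decide (i + 1 < s1.length ∧ j + 1 < s2.length ∧ pvF1 s1 (i + 1) = pvF1 s2 (j + 1)) := by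
  have hiv1 : (pvMkIv s1 s2 i j (pvRL s1 s2 i j)).1 + (pvMkIv s1 s2 i j (pvRL s1 s2 i j)).2.2.1
      = ((i + 1 : Nat) : Int) := by simp [pvMkIv]; omega
  have hiv2 : (pvMkIv s1 s2 i j (pvRL s1 s2 i j)).2.1 + (pvMkIv s1 s2 i j (pvRL s1 s2 i j)).2.2.1
      = ((j + 1 : Nat) : Int) := by simp [pvMkIv]; omega
  unfold pvPm
  rw [hiv1, hiv2]
  refine congrArg Bool.not ?_
  apply decide_eq_decide.mpr
  constructor
  · rintro ⟨a, b, c⟩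
    refine ⟨by omega, by omega, ?_⟩
    simpa using c
  · rintro ⟨a, b, c⟩
    refine ⟨by omega, by omega, ?_⟩
    simpa using c

-- ---- B's diagonal walk ----

def pvDgFrom (m n i j : Nat) : List (Nat × Nat) :=
  (List.range (min (m - i) (n - j))).map (fun k => (i + k, j + k))

theorem pvDgFrom_nil (m n i j : Nat) (h : ¬ (i < m ∧ j < n)) : pvDgFrom m n i j = [] := by
  unfold pvDgFrom
  have : min (m - i) (n - j) = 0 := by omega
  simp [this]

theorem pvDgFrom_cons (m n i j : Nat) (hi : i < m) (hj : j < n) :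
    pvDgFrom m n i j = (i, j) :: pvDgFrom m n (i + 1) (j + 1) := by
  unfold pvDgFrom
  have : min (m - i) (n - j) = min (m - (i + 1)) (n - (j + 1)) + 1 := by omega
  rw [this, List.range_succ_eq_map]
  simp only [List.map_cons, List.map_map]
  refine List.cons_eq_cons.mpr ⟨by simp, ?_⟩
  apply List.map_congr_left; intro k _
  simp only [Function.comp_apply, Prod.mk.injEq]
  omega

theorem pvWalk_eval (s1 s2 : List (Int × Int)) (mml : Int) :
    ∀ (fuel : Nat) (i j : Nat) (run : Int) (runs : List (Int × Int × Int × Int × Int)),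
    min (s1.length - i) (s2.length - j) ≤ fuel →
    run = (if i = 0 ∨ j = 0 then 0 else (pvRL s1 s2 (i - 1) (j - 1) : Int)) →
    pvWalk s1 s2 mml (s1.length : Int) (s2.length : Int) fuel (i : Int) (j : Int) run runs =
      runs ++ (pvDgFrom s1.length s2.length i j).filterMap (pvCndM s1 s2 mml) := by
  intro fuel
  induction fuel with
  | zero =>
    intro i j run runs hf hr
    rw [pvDgFrom_nil _ _ _ _ (by omega)]
    simp [pvWalk]
  | succ fuel ih =>
    intro i j run runs hf hr
    by_cases hin : i < s1.length ∧ j < s2.length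
    · rw [pvDgFrom_cons _ _ _ _ hin.1 hin.2, List.filterMap_cons]
      unfold pvWalk
      rw [if_pos (by constructor <;> [exact_mod_cast hin.1; exact_mod_cast hin.2])]
      by_cases hm : pvF1 s1 i = pvF1 s2 j
      · rw [if_pos (by simpa [PySem.List.pyGetD_natCast] using hm)]
        have hle := pvRL_le s1 s2 i j
        have hrl : run + 1 = ((pvRL s1 s2 i j : Nat) : Int) := by
          match i, j with
          | 0, j => rw [hr]; simp [pvRL, hm]
          | i + 1, 0 => rw [hr]; simp [pvRL, hm]
          | i + 1, j + 1 =>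
            rw [hr, if_neg (by omega), pvRL_succ s1 s2 i j hm]
            push_cast; simp
        have e1 : ((i : Int) + 1) = ((i + 1 : Nat) : Int) := by omega
        have e2 : ((j : Int) + 1) = ((j + 1 : Nat) : Int) := by omega
        have hrlpos : 0 < pvRL s1 s2 i j := (pvRL_pos_iff s1 s2 i j).2 hm
        have hAE : (decide ((s1.length : Int) ≤ (i : Int) + 1) || decide ((s2.length : Int) ≤ (j : Int) + 1) ||
            decide ((PySem.List.pyGetD s1 ((i : Int) + 1) (0, 0)).1 ≠ (PySem.List.pyGetD s2 ((j : Int) + 1) (0, 0)).1)) =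
            !decide (i + 1 < s1.length ∧ j + 1 < s2.length ∧ pvF1 s1 (i + 1) = pvF1 s2 (j + 1)) := by
          rw [e1, e2]
          apply Bool.eq_iff_iff.mpr
          simp only [Bool.or_eq_true, decide_eq_true_eq, Bool.not_eq_true', decide_eq_false_iff_not,
            PySem.List.pyGetD_natCast]
          by_cases h3 : pvF1 s1 (i + 1) = pvF1 s2 (j + 1) <;>
            · simp only [pvF1, List.getD_eq_getElem?_getD] at h3 ⊢
              simp [h3]
              all_goals omega
        have hpm := pvPm_mkIv s1 s2 i j
        rw [hrl, hAE]
        simp only []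
        by_cases hP : (i + 1 < s1.length ∧ j + 1 < s2.length ∧ pvF1 s1 (i + 1) = pvF1 s2 (j + 1))
        · rw [if_neg (by simp [hP])]
          have hcnd : pvCndM s1 s2 mml (i, j) = none := by
            unfold pvCndM pvCnd
            split_ifs with h1
            · simp [Option.filter, hpm, hP]
            · rfl
          rw [hcnd, e1, e2, ih (i + 1) (j + 1) _ runs (by omega) (by rw [if_neg (by omega)]; simp)]
        · by_cases hq : mml ≤ ((pvRL s1 s2 i j : Nat) : Int)
          · rw [if_pos ⟨by simp [hP], hq⟩]
            have hcnd : pvCndM s1 s2 mml (i, j) = some (pvMkIv s1 s2 i j (pvRL s1 s2 i j)) := by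
              unfold pvCndM pvCnd
              rw [if_pos ⟨hm, hq⟩]
              simp [Option.filter, hpm, hP]
            rw [hcnd, e1, e2, ih (i + 1) (j + 1) _ _ (by omega) (by rw [if_neg (by omega)]; simp)]
            have e3 : (i : Int) - ((pvRL s1 s2 i j : Nat) : Int) + 1 = ((i + 1 - pvRL s1 s2 i j : Nat) : Int) := by
              push_cast [hle.1]; omega
            have e4 : (j : Int) - ((pvRL s1 s2 i j : Nat) : Int) + 1 = ((j + 1 - pvRL s1 s2 i j : Nat) : Int) := by
              push_cast [hle.2]; omega
            rw [List.append_assoc, List.singleton_append]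
            refine congrArg _ (congrArg (· :: _) ?_)
            simp only [e3, e4, PySem.List.pyGetD_natCast]
            simp only [pvMkIv, pvF2]
            rw [← e3, ← e4]
          · rw [if_neg (by intro hcon; exact hq hcon.2)]
            have hcnd : pvCndM s1 s2 mml (i, j) = none := by
              unfold pvCndM pvCnd
              rw [if_neg (by intro hc; exact hq hc.2)]
              rfl
            rw [hcnd, e1, e2, ih (i + 1) (j + 1) _ runs (by omega) (by rw [if_neg (by omega)]; simp)]
      · rw [if_neg (by simpa [PySem.List.pyGetD_natCast] using hm)]
        have hcnd : pvCndM s1 s2 mml (i, j) = none := by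
          unfold pvCndM pvCnd
          rw [if_neg (by intro hc; exact hm hc.1)]
          rfl
        rw [hcnd]
        have e1 : ((i : Int) + 1) = ((i + 1 : Nat) : Int) := by omega
        have e2 : ((j : Int) + 1) = ((j + 1 : Nat) : Int) := by omega
        rw [e1, e2, ih (i + 1) (j + 1) 0 runs (by omega) ?_]
        have hrl0 : pvRL s1 s2 i j = 0 := by
          have := pvRL_pos_iff s1 s2 i j
          by_contra hne
          exact hm (this.1 (by omega))
        simp [hrl0]
    · rw [pvDgFrom_nil _ _ _ _ hin]
      unfold pvWalk
      rw [if_neg (by omega)]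
      simp

theorem pvB_runs (s1 s2 : List (Int × Int)) (mml : Int) :
    (PySem.List.pyRange (if 0 < (s1.length : Int) then -((s1.length : Int) - 1) else 0) (s2.length : Int) 1).foldl
      (fun runs d =>
        let i : Int := if d < 0 then -d else 0
        let j := i + d
        pvWalk s1 s2 mml (s1.length : Int) (s2.length : Int)
          ((s1.length : Int).toNat + (s2.length : Int).toNat) i j 0 runs) []
      = pvCandB s1 s2 mml := by
  rw [pvCandB, pvCellsDg, List.filterMap_flatMap]
  have hstep : ∀ (acc : List (Int × Int × Int × Int × Int)) (d : Int),
      d ∈ PySem.List.pyRange (if 0 < (s1.length : Int) then -((s1.length : Int) - 1) else 0) (s2.length : Int) 1 →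
      (let i : Int := if d < 0 then -d else 0
       let j := i + d
       pvWalk s1 s2 mml (s1.length : Int) (s2.length : Int)
         ((s1.length : Int).toNat + (s2.length : Int).toNat) i j 0 acc) =
      acc ++ (pvDiag s1.length s2.length d).filterMap (pvCndM s1 s2 mml) := by
    intro acc d hd
    rw [PySem.List.mem_pyRange_one] at hd
    simp only []
    have hi : (if d < 0 then -d else 0) = (((-d).toNat : Nat) : Int) := by
      rcases lt_or_ge d 0 with h | h
      · rw [if_pos h]; omega
      · rw [if_neg (by omega)]; omega
    have hj : (if d < 0 then -d else 0) + d = ((d.toNat : Nat) : Int) := by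
      rcases lt_or_ge d 0 with h | h
      · rw [if_pos h]; omega
      · rw [if_neg (by omega)]; omega
    rw [hj, hi]
    rw [pvWalk_eval s1 s2 mml _ (-d).toNat d.toNat 0 acc (by simp; omega)
      (by rw [if_pos (by omega)])]
    rfl
  rw [PySem.List.foldl_congr_mem _ _ _ _ hstep, PySem.List.foldl_append_eq_flatMap]
  simp

theorem pvB_eq (s1 s2 : List (Int × Int)) (mml : Int) :
    find_matching_intervals_alt s1 s2 mml = pvFF [] (pvSort (pvCandB s1 s2 mml)) := by
  unfold find_matching_intervals_alt
  simp only [PySem.List.len_eq]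
  rw [pvB_runs]
  rfl

-- ---- the two sorts produce the lex3-ordered permutation ----

theorem pvInsertBy_nil (bf : (Int × Int × Int × Int × Int) → (Int × Int × Int × Int × Int) → Bool)
    (x : Int × Int × Int × Int × Int) : PySem.List.insertBy bf x [] = [x] := rfl

theorem pvInsertBy_cons (bf : (Int × Int × Int × Int × Int) → (Int × Int × Int × Int × Int) → Bool)
    (x y : Int × Int × Int × Int × Int) (t : List (Int × Int × Int × Int × Int)) :
    PySem.List.insertBy bf x (y :: t) = if bf x y then x :: y :: t else y :: PySem.List.insertBy bf x t := rfl

theorem pvIns_mem (x z : Int × Int × Int × Int × Int) (l : List (Int × Int × Int × Int × Int)) :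
    z ∈ pvIns x l ↔ z = x ∨ z ∈ l := by
  induction l with
  | nil => simp [pvIns]
  | cons y t ih =>
    rw [pvIns]
    split
    · simp
    · simp [ih]; tauto

theorem pvIns_perm (x : Int × Int × Int × Int × Int) (l : List (Int × Int × Int × Int × Int)) :
    (pvIns x l).Perm (x :: l) := by
  induction l with
  | nil => simp [pvIns]
  | cons y t ih =>
    rw [pvIns]
    split
    · exact List.Perm.refl _
    · exact (ih.cons y).trans (List.Perm.swap x y t)

theorem pvSort_perm (l : List (Int × Int × Int × Int × Int)) : (pvSort l).Perm l := by
  have aux : ∀ (l acc : List (Int × Int × Int × Int × Int)),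
      (l.foldl (fun a x => pvIns x a) acc).Perm (acc ++ l) := by
    intro l
    induction l with
    | nil => intro acc; simp
    | cons a t ih =>
      intro acc
      refine List.Perm.trans (ih (pvIns a acc)) ?_
      refine List.Perm.trans ((pvIns_perm a acc).append_right t) ?_
      simpa using (List.perm_middle (a := a) (l₁ := acc) (l₂ := t)).symm
  simpa using aux l []

theorem pvIns_pairwise (x : Int × Int × Int × Int × Int) (l : List (Int × Int × Int × Int × Int))
    (hl : l.Pairwise pvR) (hx : ∀ y ∈ l, pvR y x ∨ pvR x y) : (pvIns x l).Pairwise pvR := by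
  induction l with
  | nil => simp [pvIns]
  | cons y t ih =>
    rw [pvIns]
    rcases List.pairwise_cons.mp hl with ⟨hyt, htp⟩
    split
    · rename_i hxy
      refine List.pairwise_cons.mpr ⟨?_, hl⟩
      intro z hz
      rcases List.mem_cons.mp hz with rfl | hz
      · exact hxy
      · exact pvR_trans (a := x) (b := y) hxy (hyt _ hz)
    · rename_i hxy
      refine List.pairwise_cons.mpr ⟨?_, ih htp (fun z hz => hx z (by simp [hz]))⟩
      intro z hz
      rcases (pvIns_mem x z t).mp hz with rfl | hz
      · rcases hx y (by simp) with h | h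
        · exact h
        · exact absurd h hxy
      · exact hyt _ hz

theorem pvSort_pairwise (l : List (Int × Int × Int × Int × Int))
    (hdist : l.Pairwise (fun a b => pvR a b ∨ pvR b a)) : (pvSort l).Pairwise pvR := by
  have aux : ∀ (l : List (Int × Int × Int × Int × Int)),
      l.Pairwise (fun a b => pvR a b ∨ pvR b a) →
      ∀ acc, acc.Pairwise pvR → (∀ y ∈ acc, ∀ x ∈ l, pvR y x ∨ pvR x y) →
      (l.foldl (fun a x => pvIns x a) acc).Pairwise pvR := by
    intro l hl
    induction l with
    | nil => intro acc hacc _; simpa using hacc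
    | cons a t ih =>
      intro acc hacc hcross
      rcases List.pairwise_cons.mp hl with ⟨hat, htp⟩
      refine ih htp (pvIns a acc) (pvIns_pairwise a acc hacc ?_) ?_
      · intro y hy
        exact hcross y hy a (by simp)
      · intro y hy x hx
        rcases (pvIns_mem a y acc).mp hy with rfl | hy
        · rcases hat x hx with h | h
          · exact Or.inl h
          · exact Or.inr h
        · exact hcross y hy x (by simp [hx])
  exact aux l hdist [] (by simp) (by simp)

theorem pvInsertBy_pairwise (x : Int × Int × Int × Int × Int) (l : List (Int × Int × Int × Int × Int))
    (hl : l.Pairwise pvR) (hx : ∀ y ∈ l, y.2.2.1 = x.2.2.1 → pvR y x) :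
    (PySem.List.insertBy (fun a b => decide (b.2.2.1 < a.2.2.1)) x l).Pairwise pvR := by
  induction l with
  | nil => rw [pvInsertBy_nil]; simp
  | cons y t ih =>
    rw [pvInsertBy_cons]
    rcases List.pairwise_cons.mp hl with ⟨hyt, htp⟩
    split
    · rename_i hlen
      have hlen' : y.2.2.1 < x.2.2.1 := of_decide_eq_true hlen
      have hxy : pvR x y := (pvR_iff x y).mpr (Or.inl hlen')
      refine List.pairwise_cons.mpr ⟨?_, hl⟩
      intro z hz
      rcases List.mem_cons.mp hz with rfl | hz
      · exact hxy
      · exact pvR_trans hxy (hyt _ hz)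
    · rename_i hlen
      have hlen' : ¬ y.2.2.1 < x.2.2.1 := by simpa using hlen
      refine List.pairwise_cons.mpr ⟨?_, ih htp (fun z hz hzl => hx z (by simp [hz]) hzl)⟩
      intro z hz
      rcases (PySem.List.mem_insertBy _ x z t).mp hz with rfl | hz
      · rcases lt_or_eq_of_le (le_of_not_gt hlen') with h | h
        · exact (pvR_iff y z).mpr (Or.inl h)
        · exact hx y (by simp) h.symm
      · exact hyt _ hz

theorem pvSortedRev_pairwise (l : List (Int × Int × Int × Int × Int))
    (htie : l.Pairwise (fun a b => a.2.2.1 = b.2.2.1 → pvR a b)) :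
    (PySem.List.sorted l (fun x => x.2.2.1) true).Pairwise pvR := by
  rw [PySem.List.sorted_rev_eq_foldl_insertBy]
  have aux : ∀ (l : List (Int × Int × Int × Int × Int)),
      l.Pairwise (fun a b => a.2.2.1 = b.2.2.1 → pvR a b) →
      ∀ acc, acc.Pairwise pvR → (∀ y ∈ acc, ∀ x ∈ l, x.2.2.1 = y.2.2.1 → pvR y x) →
      (l.foldl (fun acc x => PySem.List.insertBy (fun a b => decide (b.2.2.1 < a.2.2.1)) x acc) acc).Pairwise pvR := by
    intro l hl
    induction l with
    | nil => intro acc hacc _; simpa using hacc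
    | cons a t ih =>
      intro acc hacc hcross
      rcases List.pairwise_cons.mp hl with ⟨hat, htp⟩
      refine ih htp _ (pvInsertBy_pairwise a acc hacc ?_) ?_
      · intro y hy hl'
        exact hcross y hy a (by simp) hl'.symm
      · intro y hy x hx hlen
        rcases (PySem.List.mem_insertBy _ a y acc).mp hy with rfl | hy
        · exact hat x hx hlen.symm
        · exact hcross y hy x (by simp [hx]) hlen
  exact aux l htie [] (by simp) (by simp)

-- ---- dropping the non-maximal candidates does not change the filter loop's result ----

theorem pvFF_filter (P : (Int × Int × Int × Int × Int) → Bool) :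
    ∀ (l acc : List (Int × Int × Int × Int × Int)), l.Pairwise pvR →
    (∀ x ∈ l, P x = false →
      (∃ e ∈ acc, pvSub x e = true) ∨ ∃ y ∈ l, P y = true ∧ pvR y x ∧ pvSub x y = true) →
    pvFF acc l = pvFF acc (l.filter P) := by
  intro l
  induction l with
  | nil => intro acc _ _; rfl
  | cons a t ih =>
    intro acc hl H
    rcases List.pairwise_cons.mp hl with ⟨hat, htp⟩
    by_cases hPa : P a = true
    · rw [List.filter_cons_of_pos hPa]
      show pvFF (if acc.any (fun e => pvSub a e) then acc else acc ++ [a]) t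
        = pvFF (if acc.any (fun e => pvSub a e) then acc else acc ++ [a]) (t.filter P)
      set acc' := if acc.any (fun e => pvSub a e) then acc else acc ++ [a] with hacc'
      have hmono : ∀ e ∈ acc, e ∈ acc' := by
        intro e he
        rw [hacc']
        split
        · exact he
        · exact List.mem_append_left _ he
      have hcova : ∃ e ∈ acc', pvSub a e = true := by
        rw [hacc']
        split
        · rename_i hany
          rcases List.any_eq_true.mp hany with ⟨e, he, hsub⟩
          exact ⟨e, he, hsub⟩
        · exact ⟨a, List.mem_append_right _ (by simp), pvSub_refl a⟩
      refine ih acc' htp ?_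
      intro x hx hPx
      rcases H x (by simp [hx]) hPx with ⟨e, he, hsub⟩ | ⟨y, hy, hPy, hRyx, hsub⟩
      · exact Or.inl ⟨e, hmono e he, hsub⟩
      · rcases List.mem_cons.mp hy with rfl | hy
        · rcases hcova with ⟨e, he, hsube⟩
          exact Or.inl ⟨e, he, pvSub_trans hsub hsube⟩
        · exact Or.inr ⟨y, hy, hPy, hRyx, hsub⟩
    · rw [List.filter_cons_of_neg (by simpa using hPa)]
      have hdrop : acc.any (fun e => pvSub a e) = true := by
        rcases H a (by simp) (by simpa using hPa) with ⟨e, he, hsub⟩ | ⟨y, hy, hPy, hRya, hsub⟩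
        · exact List.any_eq_true.mpr ⟨e, he, hsub⟩
        · rcases List.mem_cons.mp hy with rfl | hy
          · rw [hPy] at hPa; exact absurd rfl hPa
          · exact absurd hRya (fun h => pvR_asymm (hat _ hy) h)
      show pvFF (if acc.any (fun e => pvSub a e) then acc else acc ++ [a]) t = pvFF acc (t.filter P)
      rw [if_pos hdrop]
      refine ih acc htp ?_
      intro x hx hPx
      rcases H x (by simp [hx]) hPx with ⟨e, he, hsub⟩ | ⟨y, hy, hPy, hRyx, hsub⟩
      · exact Or.inl ⟨e, he, hsub⟩
      · rcases List.mem_cons.mp hy with rfl | hy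
        · rw [hPy] at hPa; exact absurd rfl hPa
        · exact Or.inr ⟨y, hy, hPy, hRyx, hsub⟩

-- ---- candidates are listed in row-major end-cell order ----

def pvEL (x y : Int × Int × Int × Int × Int) : Prop :=
  x.1 + x.2.2.1 < y.1 + y.2.2.1 ∨ (x.1 + x.2.2.1 = y.1 + y.2.2.1 ∧ x.2.1 + x.2.2.1 < y.2.1 + y.2.2.1)

theorem pvCnd_some_end (s1 s2 : List (Int × Int)) (mml : Int) (i j : Nat)
    (x : Int × Int × Int × Int × Int) (h : pvCnd s1 s2 mml i j = some x) :
    x.1 + x.2.2.1 = (i : Int) + 1 ∧ x.2.1 + x.2.2.1 = (j : Int) + 1 := by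
  unfold pvCnd at h
  split_ifs at h
  cases h
  constructor <;> (simp [pvMkIv]; ring)

theorem pvCellsRM_pairwise (m n : Nat) :
    (pvCellsRM m n).Pairwise (fun c c' => c.1 < c'.1 ∨ (c.1 = c'.1 ∧ c.2 < c'.2)) := by
  unfold pvCellsRM
  apply List.pairwise_flatMap.mpr
  constructor
  · intro i _
    rw [List.pairwise_map]
    exact List.pairwise_lt_range.imp (fun h => Or.inr ⟨rfl, h⟩)
  · refine List.pairwise_lt_range.imp ?_
    intro i1 i2 h x hx y hy
    simp only [List.mem_map] at hx hy
    obtain ⟨j1, _, rfl⟩ := hx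
    obtain ⟨j2, _, rfl⟩ := hy
    exact Or.inl h

theorem pvCandA_pairwise (s1 s2 : List (Int × Int)) (mml : Int) :
    (pvCandA s1 s2 mml).Pairwise pvEL := by
  rw [pvCandA]
  apply List.pairwise_filterMap.mpr
  refine (pvCellsRM_pairwise s1.length s2.length).imp ?_
  intro c c' hcc b hb b' hb'
  obtain ⟨e1, e2⟩ := pvCnd_some_end s1 s2 mml c.1 c.2 b hb
  obtain ⟨e1', e2'⟩ := pvCnd_some_end s1 s2 mml c'.1 c'.2 b' hb'
  unfold pvEL
  rw [e1, e2, e1', e2']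
  rcases hcc with h | ⟨h1, h2⟩
  · left; exact_mod_cast (by omega : (c.1 : Int) + 1 < (c'.1 : Int) + 1)
  · right; constructor
    · omega
    · exact_mod_cast (by omega : (c.2 : Int) + 1 < (c'.2 : Int) + 1)

theorem pvEL_to_tie (x y : Int × Int × Int × Int × Int) (h : pvEL x y) (hl : x.2.2.1 = y.2.2.1) :
    pvR x y := by
  rw [pvR_iff]; unfold pvEL at h; omega

theorem pvEL_to_tot (x y : Int × Int × Int × Int × Int) (h : pvEL x y) : pvR x y ∨ pvR y x := by
  rw [pvR_iff, pvR_iff]; unfold pvEL at h; omega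

-- ---- the two cell enumerations are permutations of each other ----

theorem pvCellsRM_mem (m n : Nat) (c : Nat × Nat) : c ∈ pvCellsRM m n ↔ c.1 < m ∧ c.2 < n := by
  obtain ⟨a, b⟩ := c
  simp [pvCellsRM]

theorem pvDiag_mem_d (m n : Nat) (d : Int) (c : Nat × Nat) (h : c ∈ pvDiag m n d) :
    (c.2 : Int) - (c.1 : Int) = d := by
  unfold pvDiag at h
  simp only [List.mem_map, List.mem_range] at h
  obtain ⟨k, hk, rfl⟩ := h
  simp only
  omega

theorem pvCellsDg_mem (m n : Nat) (c : Nat × Nat) : c ∈ pvCellsDg m n ↔ c.1 < m ∧ c.2 < n := by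
  obtain ⟨a, b⟩ := c
  unfold pvCellsDg pvDiag
  simp only [List.mem_flatMap, PySem.List.mem_pyRange_one, List.mem_map, List.mem_range]
  constructor
  · rintro ⟨d, ⟨hlo, hhi⟩, k, hk, hab⟩
    obtain ⟨ha, hb⟩ := Prod.mk.injEq .. ▸ hab
    constructor <;> omega
  · rintro ⟨ha, hb⟩
    refine ⟨(b : Int) - (a : Int), ⟨?_, by omega⟩, min a b, by omega, ?_⟩
    · split_ifs with h0 <;> omega
    · have h1 : ((-((b : Int) - (a : Int))).toNat : Nat) = a - b := by omega
      have h2 : (((b : Int) - (a : Int)).toNat : Nat) = b - a := by omega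
      rw [h1, h2]
      have : a - b + min a b = a := by omega
      rw [this]
      have : b - a + min a b = b := by omega
      rw [this]

theorem pvCellsRM_nodup (m n : Nat) : (pvCellsRM m n).Nodup := by
  unfold pvCellsRM
  apply List.nodup_flatMap.mpr
  constructor
  · intro i _
    exact List.nodup_range.map (fun a b h => by simpa using congrArg Prod.snd h)
  · refine List.pairwise_lt_range.imp ?_
    intro i1 i2 h x hx hy
    simp only [List.mem_map] at hx hy
    obtain ⟨j1, _, rfl⟩ := hx
    obtain ⟨j2, _, h2⟩ := hy
    have := congrArg Prod.fst h2
    simp at this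
    omega

theorem pvCellsDg_nodup (m n : Nat) : (pvCellsDg m n).Nodup := by
  unfold pvCellsDg
  apply List.nodup_flatMap.mpr
  constructor
  · intro d _
    unfold pvDiag
    exact List.nodup_range.map (fun a b h => by
      have := congrArg Prod.fst h
      simpa using this)
  · have hlt := PySem.List.pairwise_lt_pyRange_one
      (a := if 0 < (m : Int) then -((m : Int) - 1) else 0) (b := (n : Int))
    refine hlt.imp ?_
    intro d1 d2 h x hx hy
    have e1 := pvDiag_mem_d m n d1 x hx
    have e2 := pvDiag_mem_d m n d2 x hy
    omega

theorem pvCells_perm (m n : Nat) : (pvCellsDg m n).Perm (pvCellsRM m n) := by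
  rw [List.perm_ext_iff_of_nodup (pvCellsDg_nodup m n) (pvCellsRM_nodup m n)]
  intro c
  rw [pvCellsDg_mem, pvCellsRM_mem]

theorem pvCandB_perm (s1 s2 : List (Int × Int)) (mml : Int) :
    (pvCandB s1 s2 mml).Perm ((pvCandA s1 s2 mml).filter (pvPm s1 s2)) := by
  have hAf : (pvCandA s1 s2 mml).filter (pvPm s1 s2)
      = (pvCellsRM s1.length s2.length).filterMap (pvCndM s1 s2 mml) := by
    rw [pvCandA, List.filter_filterMap]
    rfl
  rw [hAf, pvCandB]
  exact List.Perm.filterMap _ (pvCells_perm s1.length s2.length)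

-- ---- every non-maximal candidate is contained in an earlier (longer) maximal one ----

theorem pvExt (s1 s2 : List (Int × Int)) :
    ∀ (fuel i j : Nat), s1.length - i ≤ fuel → i < s1.length → j < s2.length →
    pvF1 s1 i = pvF1 s2 j →
    ∃ e : Nat, i + e < s1.length ∧ j + e < s2.length ∧
      pvRL s1 s2 (i + e) (j + e) = pvRL s1 s2 i j + e ∧
      ¬(i + e + 1 < s1.length ∧ j + e + 1 < s2.length ∧ pvF1 s1 (i + e + 1) = pvF1 s2 (j + e + 1)) := by
  intro fuel
  induction fuel with
  | zero => intro i j hf hi hj _; omega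
  | succ fuel ih =>
    intro i j hf hi hj hm
    by_cases hP : (i + 1 < s1.length ∧ j + 1 < s2.length ∧ pvF1 s1 (i + 1) = pvF1 s2 (j + 1))
    · obtain ⟨e', h1, h2, h3, h4⟩ := ih (i + 1) (j + 1) (by omega) hP.1 hP.2.1 hP.2.2
      refine ⟨e' + 1, by omega, by omega, ?_, ?_⟩
      · have ei : i + (e' + 1) = (i + 1) + e' := by omega
        have ej : j + (e' + 1) = (j + 1) + e' := by omega
        rw [ei, ej, h3, pvRL_succ s1 s2 i j hP.2.2]
        omega
      · have ei : i + (e' + 1) = (i + 1) + e' := by omega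
        have ej : j + (e' + 1) = (j + 1) + e' := by omega
        rw [ei, ej]
        exact h4
    · exact ⟨0, by omega, by omega, by simp, by simpa using hP⟩

theorem pvCandA_mem (s1 s2 : List (Int × Int)) (mml : Int) (x : Int × Int × Int × Int × Int) :
    x ∈ pvCandA s1 s2 mml ↔
      ∃ i j : Nat, i < s1.length ∧ j < s2.length ∧ pvCnd s1 s2 mml i j = some x := by
  rw [pvCandA_flat]
  simp only [List.mem_flatMap, List.mem_filterMap, List.mem_range]
  constructor
  · rintro ⟨i, hi, j, hj, hc⟩
    exact ⟨i, j, hi, hj, hc⟩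
  · rintro ⟨i, j, hi, hj, hc⟩
    exact ⟨i, hi, j, hj, hc⟩

theorem pvContainer (s1 s2 : List (Int × Int)) (mml : Int) :
    ∀ x ∈ pvCandA s1 s2 mml, pvPm s1 s2 x = false →
    ∃ y ∈ pvCandA s1 s2 mml, pvPm s1 s2 y = true ∧ pvR y x ∧ pvSub x y = true := by
  intro x hx hPx
  obtain ⟨i, j, hi, hj, hc⟩ := (pvCandA_mem s1 s2 mml x).mp hx
  have hcnd := hc
  unfold pvCnd at hcnd
  split_ifs at hcnd with hck
  obtain ⟨hm, hq⟩ := hck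
  obtain rfl := (Option.some_inj.mp hcnd).symm
  rw [pvPm_mkIv] at hPx
  have hE : i + 1 < s1.length ∧ j + 1 < s2.length ∧ pvF1 s1 (i + 1) = pvF1 s2 (j + 1) := by
    simpa using hPx
  obtain ⟨e, h1, h2, h3, h4⟩ := pvExt s1 s2 (s1.length - (i + 1)) (i + 1) (j + 1) le_rfl hE.1 hE.2.1 hE.2.2
  rw [pvRL_succ s1 s2 i j hE.2.2] at h3
  set t := pvRL s1 s2 i j with ht
  have htpos : 0 < t := (pvRL_pos_iff s1 s2 i j).2 hm
  have hle := pvRL_le s1 s2 i j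
  have hle' := pvRL_le s1 s2 (i + 1 + e) (j + 1 + e)
  refine ⟨pvMkIv s1 s2 (i + 1 + e) (j + 1 + e) (pvRL s1 s2 (i + 1 + e) (j + 1 + e)), ?_, ?_, ?_, ?_⟩
  · refine (pvCandA_mem s1 s2 mml _).mpr ⟨i + 1 + e, j + 1 + e, h1, h2, ?_⟩
    unfold pvCnd
    rw [if_pos ⟨(pvRL_pos_iff s1 s2 _ _).1 (by omega), by rw [h3]; push_cast; omega⟩]
  · rw [pvPm_mkIv]
    simp only [Bool.not_eq_true', decide_eq_false_iff_not]
    exact h4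
  · rw [pvR_iff]
    left
    simp only [pvMkIv, h3]
    push_cast
    omega
  · simp only [pvSub, pvMkIv, h3]
    apply decide_eq_true
    push_cast
    omega

-- ---- main equivalence ----

theorem pvMain (s1 s2 : List (Int × Int)) (mml : Int) :
    find_matching_intervals s1 s2 mml = find_matching_intervals_alt s1 s2 mml := by
  rw [pvA_eq, pvB_eq]
  have hperm : (PySem.List.sorted (pvCandA s1 s2 mml) (fun x => x.2.2.1) true).Perm (pvCandA s1 s2 mml) :=
    PySem.List.sorted_perm _ _ _
  have hEL := pvCandA_pairwise s1 s2 mml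
  have hSAp : (PySem.List.sorted (pvCandA s1 s2 mml) (fun x => x.2.2.1) true).Pairwise pvR :=
    pvSortedRev_pairwise _ (hEL.imp (fun h hl => pvEL_to_tie _ _ h hl))
  have hFF : pvFF [] (PySem.List.sorted (pvCandA s1 s2 mml) (fun x => x.2.2.1) true)
      = pvFF [] ((PySem.List.sorted (pvCandA s1 s2 mml) (fun x => x.2.2.1) true).filter (pvPm s1 s2)) := by
    refine pvFF_filter (pvPm s1 s2) _ [] hSAp ?_
    intro x hx hPx
    obtain ⟨y, hy, hPy, hR, hS⟩ := pvContainer s1 s2 mml x (hperm.subset hx) hPx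
    exact Or.inr ⟨y, hperm.mem_iff.mpr hy, hPy, hR, hS⟩
  have hpermB : (pvSort (pvCandB s1 s2 mml)).Perm
      ((PySem.List.sorted (pvCandA s1 s2 mml) (fun x => x.2.2.1) true).filter (pvPm s1 s2)) :=
    ((pvSort_perm _).trans (pvCandB_perm s1 s2 mml)).trans (hperm.filter _).symm
  have hBp : (pvSort (pvCandB s1 s2 mml)).Pairwise pvR := by
    refine pvSort_pairwise _ ?_
    have htotA : (pvCandA s1 s2 mml).Pairwise (fun a b => pvR a b ∨ pvR b a) :=
      hEL.imp (fun h => pvEL_to_tot _ _ h)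
    have hsym : ∀ {x y : Int × Int × Int × Int × Int},
        (pvR x y ∨ pvR y x) → (pvR y x ∨ pvR x y) := fun h => h.symm
    exact (List.Perm.pairwise_iff hsym (pvCandB_perm s1 s2 mml)).mpr (htotA.filter _)
  have hEq : ((PySem.List.sorted (pvCandA s1 s2 mml) (fun x => x.2.2.1) true).filter (pvPm s1 s2))
      = pvSort (pvCandB s1 s2 mml) := by
    refine List.Perm.eq_of_pairwise ?_ (hSAp.filter _) hBp hpermB.symm
    intro a b _ _ h1 h2
    exact absurd h2 (fun h => pvR_asymm h1 h)
  rw [hFF, hEq]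

-- ===== VERDICT (by name: the statement is the Claim_ definition above) =====
theorem find_matching_intervals_spec : Claim_equal_find_matching_intervals := by
  intro seq1 seq2 min_match_length _
  exact pvMain seq1 seq2 min_match_length
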